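-- pv_equiv track=rewrite | github.com/confirmordeny/supraverden | scripts/add_anacredit_identifier_from_mapping.py | update_lines
-- ===== SOURCE A (Python) =====
-- def update_lines(lines: list[str], name_to_ana: dict[str, str]) -> tuple[list[str], int, int]:
--     out: list[str] = []
--     i = 0
--     inserted = 0
--     updated = 0
--
--     while i < len(lines):
--         line = lines[i]
--         if line and not line.startswith(" ") and line.rstrip().endswith(":"):
--             out.append(line)
--             i += 1
--
--             block: list[str] = []
--             while i < len(lines):
--                 nxt = lines[i]
--                 if nxt and not nxt.startswith(" ") and nxt.rstrip().endswith(":"):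
--                     break
--                 block.append(nxt)
--                 i += 1
--
--             name_idx = None
--             name_val = ""
--             ana_idx = None
--             os_idx = None
--
--             for bi, b in enumerate(block):
--                 s = b.strip()
--                 if s.startswith("Name_en:"):
--                     name_idx = bi
--                     name_val = s.split(":", 1)[1].strip()
--                 elif s.startswith("OpenSanctions_id:"):
--                     os_idx = bi
--                 elif s.startswith("RIAD_code:"):
--                     ana_idx = bi
--
--             target = name_to_ana.get(name_val)
--             if target:
--                 new_line = f"  RIAD_code: {target}\n"
--                 if ana_idx is not None:
--                     cur = block[ana_idx].strip().split(":", 1)[1].strip()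
--                     if cur != target:
--                         block[ana_idx] = new_line
--                         updated += 1
--                 else:
--                     if os_idx is not None:
--                         block.insert(os_idx + 1, new_line)
--                     elif name_idx is not None:
--                         block.insert(name_idx + 1, new_line)
--                     else:
--                         block.append(new_line)
--                     inserted += 1
--
--             out.extend(block)
--             continue
--
--         out.append(line)
--         i += 1
--
--     return out, inserted, updated
-- ===== SOURCE B (Python) =====
-- def _is_header(line):
--     return bool(line) and not line.startswith(" ") and line.rstrip().endswith(":")
--
--
-- def _val_after_colon(s):
--     return s.split(":", 1)[1].strip()
--
--
-- def _split_blocks(lines):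
--     # backward pass: collect the body of each header, and the preamble
--     pre = []
--     segs = []
--     for line in reversed(lines):
--         if _is_header(line):
--             segs.append((line, pre[::-1]))
--             pre = []
--         else:
--             pre.append(line)
--     pre.reverse()
--     segs.reverse()
--     return pre, segs
--
--
-- def _transform(body, name_to_ana):
--     riad = [j for j, b in enumerate(body) if b.strip().startswith("RIAD_code:")]
--     names = [j for j, b in enumerate(body) if b.strip().startswith("Name_en:")]
--     oss = [j for j, b in enumerate(body) if b.strip().startswith("OpenSanctions_id:")]
--     name_val = _val_after_colon(body[names[-1]].strip()) if names else ""
--     target = name_to_ana.get(name_val)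
--     if not target:
--         return body, 0, 0
--     new_line = f"  RIAD_code: {target}\n"
--     if riad:
--         k = riad[-1]
--         if _val_after_colon(body[k].strip()) == target:
--             return body, 0, 0
--         return body[:k] + [new_line] + body[k + 1:], 0, 1
--     pos = oss[-1] + 1 if oss else (names[-1] + 1 if names else len(body))
--     return body[:pos] + [new_line] + body[pos:], 1, 0
--
--
-- def update_lines(lines: list[str], name_to_ana: dict[str, str]) -> tuple[list[str], int, int]:
--     pre, segs = _split_blocks(lines)
--     out = list(pre)
--     inserted = 0
--     updated = 0
--     for header, body in segs:
--         nb, di, du = _transform(body, name_to_ana)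
--         out.append(header)
--         out.extend(nb)
--         inserted += di
--         updated += du
--     return out, inserted, updated
-- ===== Notes on version B (the rewrite author's own statement) =====
-- stated objective: alternative
-- what changed: A's single indexed while-loop with an inline enumerate-fold and in-place block mutation is re-decomposed into three phases: a right-fold split of the lines into preamble plus (header, body) segments, a per-body transform using index comprehensions, xs[-1] and slicing, and a final emit loop summing the counts.
import Mathlib
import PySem

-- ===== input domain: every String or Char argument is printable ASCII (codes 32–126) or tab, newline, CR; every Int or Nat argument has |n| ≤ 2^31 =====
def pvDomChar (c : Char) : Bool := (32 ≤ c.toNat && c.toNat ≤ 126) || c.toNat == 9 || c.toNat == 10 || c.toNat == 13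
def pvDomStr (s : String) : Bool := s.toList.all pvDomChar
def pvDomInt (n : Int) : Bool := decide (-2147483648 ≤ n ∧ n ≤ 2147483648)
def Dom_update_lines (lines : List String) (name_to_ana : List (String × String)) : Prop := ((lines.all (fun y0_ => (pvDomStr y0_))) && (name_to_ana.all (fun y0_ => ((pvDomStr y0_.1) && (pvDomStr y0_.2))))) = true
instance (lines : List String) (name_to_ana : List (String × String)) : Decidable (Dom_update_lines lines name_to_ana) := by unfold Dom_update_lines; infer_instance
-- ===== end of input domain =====

-- B re-decomposes A's single indexed while-loop into split-into-blocks / transform-each-body / re-emit phases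
-- (objective: alternative decomposition, same cost); return values proved equal on all inputs.

-- ===== PORT A =====
-- shared header test: `line and not line.startswith(" ") and line.rstrip().endswith(":")`
def pvHeader (l : String) : Bool :=
  !(l == "") && !(PySem.Str.startswith l " ") && PySem.Str.endswith (PySem.Str.rstrip l) ":"

-- `s.split(":", 1)[1].strip()` — total form of the [1] index; only applied to strings containing ":"
def pvVal (s : String) : String :=
  PySem.Str.strip (((PySem.Str.splitMax? s ":" 1).getD [])[1]?.getD "")

-- body of A's `for bi, b in enumerate(block)` loop; state = (name_idx, name_val, os_idx, ana_idx)
def pvStepA (st : Option Int × String × Option Int × Option Int) (p : Int × String) :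
    Option Int × String × Option Int × Option Int :=
  let s := PySem.Str.strip p.2
  if PySem.Str.startswith s "Name_en:" then (some p.1, pvVal s, st.2.2.1, st.2.2.2)
  else if PySem.Str.startswith s "OpenSanctions_id:" then (st.1, st.2.1, some p.1, st.2.2.2)
  else if PySem.Str.startswith s "RIAD_code:" then (st.1, st.2.1, st.2.2.1, some p.1)
  else st

-- A's per-block work: the enumerate-fold, then the `if target:` edit of `block`
-- (`if target:` — a missing key (None) and "" are both falsy, so ported as getD "" == "")
def pvBlockA (nta : List (String × String)) (block : List String) : List String × Int × Int :=
  let st := (PySem.List.enumerate block).foldl pvStepA (none, "", none, none)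
  let target := (PySem.Dict.ofList nta).getD st.2.1 ""
  if target == "" then (block, 0, 0)
  else
    let new_line := "  RIAD_code: " ++ target ++ "\n"
    match st.2.2.2 with
    | some ai =>
        let cur := pvVal (PySem.Str.strip (PySem.List.pyGetD block ai ""))
        if cur != target then (PySem.List.pySetD block ai new_line, 0, 1) else (block, 0, 0)
    | none =>
        match st.2.2.1 with
        | some oi => (PySem.List.insert block (oi + 1) new_line, 1, 0)
        | none =>
            match st.1 with
            | some ni => (PySem.List.insert block (ni + 1) new_line, 1, 0)
            | none => (block ++ [new_line], 1, 0)

-- A's outer `while i < len(lines)` on the remaining suffix; the inner block-collecting while is the takeWhile/dropWhile split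
def pvLoopA (nta : List (String × String)) (lines : List String) : List String × Int × Int :=
  match lines with
  | [] => ([], 0, 0)
  | l :: rest =>
    if pvHeader l then
      let block := rest.takeWhile (fun x => !pvHeader x)
      let b := pvBlockA nta block
      let r := pvLoopA nta (rest.dropWhile (fun x => !pvHeader x))
      (l :: (b.1 ++ r.1), b.2.1 + r.2.1, b.2.2 + r.2.2)
    else
      let r := pvLoopA nta rest
      (l :: r.1, r.2.1, r.2.2)
  termination_by lines.length
  decreasing_by
  · have := List.length_dropWhile_le (fun x => !pvHeader x) rest; simp; omega
  · simp

def update_lines (lines : List String) (name_to_ana : List (String × String)) : List String × Int × Int :=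
  pvLoopA name_to_ana lines

-- ===== PORT B =====
-- Source B's _split_blocks: one backward pass (a right fold) producing the preamble and the (header, body) segments
def pvSplitB (lines : List String) : List String × List (String × List String) :=
  match lines with
  | [] => ([], [])
  | l :: rest =>
      let ps := pvSplitB rest
      if pvHeader l then ([], (l, ps.1) :: ps.2) else (l :: ps.1, ps.2)

-- Source B's comprehension `[j for j, b in enumerate(body) if b.strip().startswith(key)]`
def pvIdxs (body : List String) (key : String) : List Int :=
  ((PySem.List.enumerate body).filter (fun p => PySem.Str.startswith (PySem.Str.strip p.2) key)).map (fun p => p.1)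

-- Source B's _transform: index comprehensions, `xs[-1]` = getLast?, slicing instead of mutation
def pvTransformB (nta : List (String × String)) (body : List String) : List String × Int × Int :=
  let riad := pvIdxs body "RIAD_code:"
  let names := pvIdxs body "Name_en:"
  let oss := pvIdxs body "OpenSanctions_id:"
  let name_val := match names.getLast? with
    | some j => pvVal (PySem.Str.strip (PySem.List.pyGetD body j ""))
    | none => ""
  let target := (PySem.Dict.ofList nta).getD name_val ""   -- `if not target:` — None and "" both falsy
  if target == "" then (body, 0, 0)
  else
    let new_line := "  RIAD_code: " ++ target ++ "\n"
    match riad.getLast? with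
    | some k =>
        if pvVal (PySem.Str.strip (PySem.List.pyGetD body k "")) == target then (body, 0, 0)
        else (PySem.List.slice body none (some k) ++ new_line :: PySem.List.slice body (some (k + 1)) none, 0, 1)
    | none =>
        let pos : Int := match oss.getLast? with
          | some o => o + 1
          | none => match names.getLast? with
            | some n => n + 1
            | none => (body.length : Int)
        (PySem.List.slice body none (some pos) ++ new_line :: PySem.List.slice body (some pos) none, 1, 0)

-- Source B's final emit loop over the segments
def pvEmitB (nta : List (String × String)) (segs : List (String × List String)) : List String × Int × Int :=
  match segs with
  | [] => ([], 0, 0)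
  | (h, body) :: rest =>
      let t := pvTransformB nta body
      let r := pvEmitB nta rest
      (h :: (t.1 ++ r.1), t.2.1 + r.2.1, t.2.2 + r.2.2)

def update_lines_alt (lines : List String) (name_to_ana : List (String × String)) : List String × Int × Int :=
  let ps := pvSplitB lines
  let r := pvEmitB name_to_ana ps.2
  (ps.1 ++ r.1, r.2.1, r.2.2)

-- ===== PRECONDITION & SPEC =====
def Spec_update_lines (lines : List String) (name_to_ana : List (String × String)) (out : List String × Int × Int) : Prop := out = update_lines_alt lines name_to_ana
instance (lines : List String) (name_to_ana : List (String × String)) (out : List String × Int × Int) : Decidable (Spec_update_lines lines name_to_ana out) := by unfold Spec_update_lines; infer_instance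

-- ===== CLAIM (what is proved, stated in full; the proofs are below) =====
def Claim_equal_update_lines : Prop := ∀ (lines : List String) (name_to_ana : List (String × String)), Dom_update_lines lines name_to_ana → Spec_update_lines lines name_to_ana (update_lines lines name_to_ana)

-- ===== LEMMAS AND PROOFS =====

-- the three per-line classifiers of A's elif chain
def pvPn (p : Int × String) : Bool := PySem.Str.startswith (PySem.Str.strip p.2) "Name_en:"
def pvPo (p : Int × String) : Bool := PySem.Str.startswith (PySem.Str.strip p.2) "OpenSanctions_id:"
def pvPr (p : Int × String) : Bool := PySem.Str.startswith (PySem.Str.strip p.2) "RIAD_code:"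

-- "last matching element wins" as a fold
def pvLastF {α : Type} (l : List (Int × String)) (d : α) (f : Int × String → α) : α :=
  l.foldl (fun _ p => f p) d

lemma pvLastF_eq {α : Type} (l : List (Int × String)) (d : α) (f : Int × String → α) :
    pvLastF l d f = (l.getLast?).elim d f := by
  induction l using List.reverseRecOn with
  | nil => rfl
  | append_singleton t x _ => simp [pvLastF, List.foldl_append]

lemma pvScan_char (l : List (Int × String)) : ∀ (n0 : Option Int) (v0 : String) (o0 a0 : Option Int),
    l.foldl pvStepA (n0, v0, o0, a0) =
      ( pvLastF (l.filter pvPn) n0 (fun p => some p.1),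
        pvLastF (l.filter pvPn) v0 (fun p => pvVal (PySem.Str.strip p.2)),
        pvLastF (l.filter (fun p => !pvPn p && pvPo p)) o0 (fun p => some p.1),
        pvLastF (l.filter (fun p => !pvPn p && !pvPo p && pvPr p)) a0 (fun p => some p.1) ) := by
  induction l with
  | nil => intro n0 v0 o0 a0; rfl
  | cons p t ih =>
      intro n0 v0 o0 a0
      by_cases h1 : pvPn p
      · simp only [List.foldl_cons, List.filter_cons, h1]
        rw [show pvStepA (n0, v0, o0, a0) p = (some p.1, pvVal (PySem.Str.strip p.2), o0, a0) by
          simp [pvStepA, pvPn] at h1 ⊢; simp [h1]]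
        rw [ih]; simp [pvLastF]
      · by_cases h2 : pvPo p
        · simp only [List.foldl_cons, List.filter_cons, h1, h2]
          rw [show pvStepA (n0, v0, o0, a0) p = (n0, v0, some p.1, a0) by
            simp [pvStepA, pvPn, pvPo] at h1 h2 ⊢; simp [h1, h2]]
          rw [ih]; simp [pvLastF]
        · by_cases h3 : pvPr p
          · simp only [List.foldl_cons, List.filter_cons, h1, h2, h3]
            rw [show pvStepA (n0, v0, o0, a0) p = (n0, v0, o0, some p.1) by
              simp [pvStepA, pvPn, pvPo, pvPr] at h1 h2 h3 ⊢; simp [h1, h2, h3]]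
            rw [ih]; simp [pvLastF]
          · simp only [List.foldl_cons, List.filter_cons, h1, h2, h3]
            rw [show pvStepA (n0, v0, o0, a0) p = (n0, v0, o0, a0) by
              simp [pvStepA, pvPn, pvPo, pvPr] at h1 h2 h3 ⊢; simp [h1, h2, h3]]
            rw [ih]; simp [pvLastF]

-- the three key prefixes are mutually exclusive (different first characters)
lemma pvHeadOfStartswith (s p : String) (c : Char) (hc : p.toList.head? = some c)
    (h : PySem.Str.startswith s p = true) : s.toList.head? = some c := by
  rw [PySem.Str.startswith_eq, PySem.Chars.startswith_iff] at h
  obtain ⟨u, hu⟩ := h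
  cases hp : p.toList with
  | nil => rw [hp] at hc; simp at hc
  | cons a tp =>
      rw [hp] at hc hu
      rw [← hu]
      simpa using hc

lemma pvO_not_N (p : Int × String) (h : pvPo p = true) : pvPn p = false := by
  by_contra hn
  have hn' : pvPn p = true := by revert hn; cases pvPn p <;> simp
  have h1 := pvHeadOfStartswith _ _ 'O' (by decide) h
  have h2 := pvHeadOfStartswith _ _ 'N' (by decide) hn'
  rw [h1] at h2; simp at h2

lemma pvR_not_N (p : Int × String) (h : pvPr p = true) : pvPn p = false := by
  by_contra hn
  have hn' : pvPn p = true := by revert hn; cases pvPn p <;> simp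
  have h1 := pvHeadOfStartswith _ _ 'R' (by decide) h
  have h2 := pvHeadOfStartswith _ _ 'N' (by decide) hn'
  rw [h1] at h2; simp at h2

lemma pvR_not_O (p : Int × String) (h : pvPr p = true) : pvPo p = false := by
  by_contra hn
  have hn' : pvPo p = true := by revert hn; cases pvPo p <;> simp
  have h1 := pvHeadOfStartswith _ _ 'R' (by decide) h
  have h2 := pvHeadOfStartswith _ _ 'O' (by decide) hn'
  rw [h1] at h2; simp at h2

lemma pvFilterO (l : List (Int × String)) :
    l.filter (fun p => !pvPn p && pvPo p) = l.filter pvPo := by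
  apply List.filter_congr
  intro p _
  cases ho : pvPo p
  · simp
  · simp [pvO_not_N p ho]

lemma pvFilterR (l : List (Int × String)) :
    l.filter (fun p => !pvPn p && !pvPo p && pvPr p) = l.filter pvPr := by
  apply List.filter_congr
  intro p _
  cases hr : pvPr p
  · simp
  · simp [pvR_not_N p hr, pvR_not_O p hr]

-- a last element of a filtered enumeration is (↑k, block[k]) for some k < length
lemma pvLastEnum (block : List String) (P : Int × String → Bool) (p : Int × String)
    (h : (((PySem.List.enumerate block).filter P).getLast?) = some p) :
    ∃ k : Nat, k < block.length ∧ p.1 = (k : Int) ∧ PySem.List.pyGetD block p.1 "" = p.2 := by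
  have hmem : p ∈ (PySem.List.enumerate block).filter P := by
    exact List.mem_of_getLast? h
  have hmem' : p ∈ PySem.List.enumerate block := (List.mem_filter.mp hmem).1
  rw [PySem.List.mem_enumerate_iff] at hmem'
  obtain ⟨k, hk, hp⟩ := hmem'
  refine ⟨k, hk, ?_, ?_⟩
  · rw [hp]; simp
  · rw [hp]; simp [PySem.List.pyGetD_natCast, List.getElem?_eq_getElem hk]

-- the per-block edit agrees
lemma pvBlock_eq (nta : List (String × String)) (block : List String) :
    pvBlockA nta block = pvTransformB nta block := by
  simp only [pvBlockA, pvTransformB]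
  rw [pvScan_char]
  rw [pvFilterO, pvFilterR]
  rw [show pvIdxs block "RIAD_code:" = ((PySem.List.enumerate block).filter pvPr).map (fun p => p.1) from rfl,
      show pvIdxs block "Name_en:" = ((PySem.List.enumerate block).filter pvPn).map (fun p => p.1) from rfl,
      show pvIdxs block "OpenSanctions_id:" = ((PySem.List.enumerate block).filter pvPo).map (fun p => p.1) from rfl]
  rw [List.getLast?_map, List.getLast?_map, List.getLast?_map]
  rw [pvLastF_eq, pvLastF_eq, pvLastF_eq, pvLastF_eq]
  cases hN : ((PySem.List.enumerate block).filter pvPn).getLast? with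
  | none =>
      simp only [Option.elim, Option.map_none]
      cases hR : ((PySem.List.enumerate block).filter pvPr).getLast? with
      | none =>
          simp only [Option.elim, Option.map_none]
          cases hO : ((PySem.List.enumerate block).filter pvPo).getLast? with
          | none =>
              simp only [Option.elim, Option.map_none]
              split
              · rfl
              · simp [PySem.List.slice_to_natCast, PySem.List.slice_from_natCast,
                      List.take_length, List.drop_length]
          | some pO =>
              obtain ⟨k, hk, hfst, _⟩ := pvLastEnum block pvPo pO hO
              simp only [Option.elim, Option.map_some]
              split
              · rfl
              · rw [hfst, show ((k : Int) + 1) = ((k + 1 : Nat) : Int) by push_cast; ring,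
                    PySem.List.insert_natCast _ (k + 1) _ (by omega)]
                rw [PySem.List.slice_to_natCast, PySem.List.slice_from_natCast]
      | some pR =>
          obtain ⟨k, hk, hfst, hget⟩ := pvLastEnum block pvPr pR hR
          simp only [Option.elim, Option.map_some]
          split
          · rfl
          · rw [hget]
            rw [show (pvVal (PySem.Str.strip pR.2) !=
                  (PySem.Dict.ofList nta).getD "" "") =
                 !(pvVal (PySem.Str.strip pR.2) ==
                  (PySem.Dict.ofList nta).getD "" "") from rfl]
            cases heq : (pvVal (PySem.Str.strip pR.2) == (PySem.Dict.ofList nta).getD "" "")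
            · simp only [Bool.not_false, if_true, if_false]
              rw [hfst, show ((k : Int) + 1) = ((k + 1 : Nat) : Int) by push_cast; ring,
                  PySem.List.pySetD_natCast, List.set_eq_take_append_cons_drop, if_pos hk,
                  PySem.List.slice_to_natCast, PySem.List.slice_from_natCast]
              simp
            · simp
  | some pN =>
      obtain ⟨k, hk, hfst, hget⟩ := pvLastEnum block pvPn pN hN
      simp only [Option.elim, Option.map_some]
      rw [hget]
      cases hR : ((PySem.List.enumerate block).filter pvPr).getLast? with
      | none =>
          simp only [Option.elim, Option.map_none]
          cases hO : ((PySem.List.enumerate block).filter pvPo).getLast? with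
          | none =>
              simp only [Option.elim, Option.map_none]
              split
              · rfl
              · rw [hfst, show ((k : Int) + 1) = ((k + 1 : Nat) : Int) by push_cast; ring,
                    PySem.List.insert_natCast _ (k + 1) _ (by omega)]
                rw [PySem.List.slice_to_natCast, PySem.List.slice_from_natCast]
          | some pO =>
              obtain ⟨k2, hk2, hfst2, _⟩ := pvLastEnum block pvPo pO hO
              simp only [Option.elim, Option.map_some]
              split
              · rfl
              · rw [hfst2, show ((k2 : Int) + 1) = ((k2 + 1 : Nat) : Int) by push_cast; ring,
                    PySem.List.insert_natCast _ (k2 + 1) _ (by omega)]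
                rw [PySem.List.slice_to_natCast, PySem.List.slice_from_natCast]
      | some pR =>
          obtain ⟨k2, hk2, hfst2, hget2⟩ := pvLastEnum block pvPr pR hR
          simp only [Option.elim, Option.map_some]
          split
          · rfl
          · rw [hget2]
            rw [show (pvVal (PySem.Str.strip pR.2) !=
                  (PySem.Dict.ofList nta).getD (pvVal (PySem.Str.strip pN.2)) "") =
                 !(pvVal (PySem.Str.strip pR.2) ==
                  (PySem.Dict.ofList nta).getD (pvVal (PySem.Str.strip pN.2)) "") from rfl]
            cases heq : (pvVal (PySem.Str.strip pR.2) ==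
                (PySem.Dict.ofList nta).getD (pvVal (PySem.Str.strip pN.2)) "")
            · simp only [Bool.not_false, if_true, if_false]
              rw [hfst2, show ((k2 : Int) + 1) = ((k2 + 1 : Nat) : Int) by push_cast; ring,
                  PySem.List.pySetD_natCast, List.set_eq_take_append_cons_drop, if_pos hk2,
                  PySem.List.slice_to_natCast, PySem.List.slice_from_natCast]
              simp
            · simp

-- pvSplitB's first component is the preamble up to the first header
lemma pvSplitB_fst (xs : List String) :
    (pvSplitB xs).1 = xs.takeWhile (fun x => !pvHeader x) := by
  induction xs with
  | nil => rfl
  | cons x t ih =>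
      by_cases h : pvHeader x
      · simp [pvSplitB, h, List.takeWhile_cons]
      · simp [pvSplitB, h, List.takeWhile_cons, ih]

-- pvSplitB's segments only depend on the part from the first header on
lemma pvSplitB_snd_drop (xs : List String) :
    (pvSplitB xs).2 = (pvSplitB (xs.dropWhile (fun x => !pvHeader x))).2 := by
  induction xs with
  | nil => rfl
  | cons x t ih =>
      by_cases h : pvHeader x
      · simp [List.dropWhile_cons, h]
      · simp only [List.dropWhile_cons]
        rw [show pvSplitB (x :: t) = ((x :: (pvSplitB t).1, (pvSplitB t).2) : _) by simp [pvSplitB, h]]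
        simp [h, ih]

lemma pvTakeDrop (q : String → Bool) (l : List String) :
    (l.dropWhile q).takeWhile q = [] := by
  induction l with
  | nil => rfl
  | cons x t ih =>
      by_cases h : q x
      · simp [List.dropWhile_cons, h, ih]
      · simp [List.dropWhile_cons, h, List.takeWhile_cons]

lemma pvMain (nta : List (String × String)) : ∀ (n : Nat) (lines : List String), lines.length ≤ n →
    pvLoopA nta lines = ((pvSplitB lines).1 ++ (pvEmitB nta (pvSplitB lines).2).1,
      (pvEmitB nta (pvSplitB lines).2).2.1, (pvEmitB nta (pvSplitB lines).2).2.2) := by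
  intro n
  induction n with
  | zero =>
      intro lines hlen
      have : lines = [] := List.eq_nil_of_length_eq_zero (Nat.le_zero.mp hlen)
      subst this; rw [pvLoopA]; rfl
  | succ n ih =>
      intro lines hlen
      cases lines with
      | nil => rw [pvLoopA]; rfl
      | cons l rest =>
          by_cases h : pvHeader l
          · rw [show pvLoopA nta (l :: rest) =
                (l :: ((pvBlockA nta (rest.takeWhile (fun x => !pvHeader x))).1 ++
                    (pvLoopA nta (rest.dropWhile (fun x => !pvHeader x))).1),
                  (pvBlockA nta (rest.takeWhile (fun x => !pvHeader x))).2.1 +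
                    (pvLoopA nta (rest.dropWhile (fun x => !pvHeader x))).2.1,
                  (pvBlockA nta (rest.takeWhile (fun x => !pvHeader x))).2.2 +
                    (pvLoopA nta (rest.dropWhile (fun x => !pvHeader x))).2.2) by
              rw [pvLoopA]; simp [h]]
            have hrec := ih (rest.dropWhile (fun x => !pvHeader x))
              (le_trans (List.length_dropWhile_le _ _) (Nat.le_of_succ_le_succ hlen))
            rw [hrec]
            rw [show pvSplitB (l :: rest) = (([], (l, (pvSplitB rest).1) :: (pvSplitB rest).2) : _) by
              simp [pvSplitB, h]]
            rw [show (pvSplitB (rest.dropWhile (fun x => !pvHeader x))).1 = [] by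
              rw [pvSplitB_fst, pvTakeDrop]]
            rw [show (pvSplitB (rest.dropWhile (fun x => !pvHeader x))).2 = (pvSplitB rest).2 from
              (pvSplitB_snd_drop rest).symm]
            rw [pvBlock_eq, ← pvSplitB_fst]
            simp [pvEmitB]
          · rw [show pvLoopA nta (l :: rest) =
                (l :: (pvLoopA nta rest).1, (pvLoopA nta rest).2.1, (pvLoopA nta rest).2.2) by
              rw [pvLoopA]; simp [h]]
            have hrec := ih rest (Nat.le_of_succ_le_succ hlen)
            rw [hrec]
            rw [show pvSplitB (l :: rest) = ((l :: (pvSplitB rest).1, (pvSplitB rest).2) : _) by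
              simp [pvSplitB, h]]
            simp

-- ===== VERDICT (by name: the statement is the Claim_ definition above) =====
theorem update_lines_spec : Claim_equal_update_lines := by
  intro lines nta _
  unfold Spec_update_lines update_lines update_lines_alt
  exact pvMain nta lines.length lines le_rfl
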